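-- pv_equiv track=rewrite | github.com/shivamr021/DSA | Coding Ninjas/Terms Of AP Series.py | termsOfAP
-- ===== SOURCE A (Python) =====
-- def termsOfAP(x):
--
--     # Write your code here
--     # Return a list of integers
--     ans = []
--     n = 1
--     while len(ans) < x:
--         term = 3 * n + 2
--         if term % 4 != 0:
--             ans.append(term)
--         n += 1
--     return ans
-- ===== SOURCE B (Python) =====
-- def termsOfAP(x):
--     # Closed form: term 3n+2 is a multiple of 4 exactly when n % 4 == 2,
--     # so the kept n-values are 4*b + o with o in (1, 3, 4).
--     return [3 * (4 * (i // 3) + (1, 3, 4)[i % 3]) + 2 for i in range(x)]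
-- ===== Notes on version B (the rewrite author's own statement) =====
-- stated objective: simpler
-- what changed: Replaced the generate-and-filter while-loop (try every n, skip terms divisible by four) by a direct closed-form comprehension that computes the i-th kept term straight from i, so no candidates are generated and discarded.
import Mathlib
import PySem

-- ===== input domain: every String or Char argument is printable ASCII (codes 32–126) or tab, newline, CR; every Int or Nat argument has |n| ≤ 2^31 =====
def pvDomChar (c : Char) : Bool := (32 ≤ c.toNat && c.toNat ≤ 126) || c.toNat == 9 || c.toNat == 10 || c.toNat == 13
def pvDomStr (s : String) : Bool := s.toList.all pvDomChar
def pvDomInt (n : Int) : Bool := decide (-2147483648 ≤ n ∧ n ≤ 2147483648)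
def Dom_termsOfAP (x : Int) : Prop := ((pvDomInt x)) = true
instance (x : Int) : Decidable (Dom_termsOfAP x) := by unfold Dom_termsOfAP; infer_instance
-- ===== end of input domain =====

-- B replaces A's generate-and-filter while-loop by a closed-form comprehension for the i-th kept term (objective: simpler).

-- ===== PORT A =====
-- while len(ans) < x: term = 3*n+2; if term % 4 != 0: ans.append(term); n += 1
def termsOfAP_go (x : Int) (ans : List Int) (n : Int) : List Int :=
  if (ans.length : Int) < x then
    if PySem.Int.mod (3 * n + 2) 4 ≠ 0 then
      termsOfAP_go x (ans ++ [3 * n + 2]) (n + 1)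
    else
      termsOfAP_go x ans (n + 1)
  else ans
termination_by 2 * (x - ans.length).toNat + (if n % 4 = 2 then 1 else 0)
decreasing_by
  · rename_i hlt _
    simp only [List.length_append, List.length_cons, List.length_nil]
    split_ifs <;> omega
  · rename_i hlt hmod
    rw [not_ne_iff, PySem.Int.mod_eq_emod_of_pos (by norm_num)] at hmod
    split_ifs <;> omega

def termsOfAP (x : Int) : List Int := termsOfAP_go x [] 1

-- ===== PORT B =====
-- return [3 * (4 * (i // 3) + (1, 3, 4)[i % 3]) + 2 for i in range(x)]
-- (the tuple index i % 3 is always in range for i ≥ 0, so the .getD default is never used)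
def termsOfAP_alt (x : Int) : List Int :=
  (PySem.List.pyRange 0 x 1).map (fun i =>
    3 * (4 * PySem.Int.floordiv i 3
          + (PySem.List.pyGet? ([1, 3, 4] : List Int) (PySem.Int.mod i 3)).getD 0) + 2)

-- ===== PRECONDITION & SPEC =====
def Spec_termsOfAP (x : Int) (out : List Int) : Prop := out = termsOfAP_alt x
instance (x : Int) (out : List Int) : Decidable (Spec_termsOfAP x out) := by unfold Spec_termsOfAP; infer_instance

-- ===== CLAIM (what is proved, stated in full; the proofs are below) =====
def Claim_equal_termsOfAP : Prop := ∀ (x : Int), Dom_termsOfAP x → Spec_termsOfAP x (termsOfAP x)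

-- ===== LEMMAS AND PROOFS =====

-- the n-value of the k-th kept term, and the term itself
def pvOff (r : Nat) : Int := if r = 0 then 1 else if r = 1 then 3 else 4
def pvN (k : Nat) : Int := 4 * ((k / 3 : Nat) : Int) + pvOff (k % 3)
def pvTerm (k : Nat) : Int := 3 * pvN k + 2
def pvTail (k m : Nat) : List Int := (List.range m).map (fun j => pvTerm (k + j))

lemma pvOff0 : pvOff 0 = 1 := rfl
lemma pvOff1 : pvOff 1 = 3 := rfl
lemma pvOff2 : pvOff 2 = 4 := rfl

lemma pvTail_succ (k m : Nat) : pvTail k (m + 1) = pvTerm k :: pvTail (k + 1) m := by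
  simp only [pvTail, List.range_succ_eq_map, List.map_cons, List.map_map, Nat.add_zero]
  congr 1
  apply List.map_congr_left
  intro j _
  simp only [Function.comp]
  congr 1
  omega

lemma pvTerm_mod (k : Nat) :
    PySem.Int.mod (3 * pvN k + 2) 4 ≠ 0 := by
  rw [PySem.Int.mod_eq_emod_of_pos (by norm_num)]
  have h3 : k % 3 = 0 ∨ k % 3 = 1 ∨ k % 3 = 2 := by omega
  rcases h3 with h | h | h <;> simp only [pvN, h, pvOff0, pvOff1, pvOff2] <;> omega

lemma go_eq (x : Int) :
    ∀ (m k : Nat) (ans : List Int), ans.length = k → (x - k).toNat = m →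
      termsOfAP_go x ans (pvN k) = ans ++ pvTail k m := by
  intro m
  induction m with
  | zero =>
    intro k ans hlen hm
    rw [termsOfAP_go, if_neg (by rw [hlen]; omega)]
    simp [pvTail]
  | succ m ih =>
    intro k ans hlen hm
    have hlt : (ans.length : Int) < x := by rw [hlen]; omega
    rw [termsOfAP_go, if_pos hlt, if_pos (pvTerm_mod k)]
    have hlen' : (ans ++ [3 * pvN k + 2]).length = k + 1 := by simp [hlen]
    have h3 : k % 3 = 0 ∨ k % 3 = 1 ∨ k % 3 = 2 := by omega
    rcases h3 with h | h | h
    · -- pvN k + 1 ≡ 2 (mod 4): one candidate skipped before the next kept term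
      by_cases hx : ((k : Int) + 1) < x
      · rw [termsOfAP_go, if_pos (by rw [hlen']; omega)]
        have hskip : ¬ PySem.Int.mod (3 * (pvN k + 1) + 2) 4 ≠ 0 := by
          rw [not_ne_iff, PySem.Int.mod_eq_emod_of_pos (by norm_num)]
          simp only [pvN, h, pvOff0]
          omega
        rw [if_neg hskip]
        have h1 : (k + 1) % 3 = 1 := by omega
        have h2 : (k + 1) / 3 = k / 3 := by omega
        have hstep : pvN k + 1 + 1 = pvN (k + 1) := by
          simp only [pvN, h, h1, h2, pvOff0, pvOff1]
          ring
        rw [hstep, ih (k + 1) _ hlen' (by omega)]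
        rw [pvTail_succ]
        simp [pvTerm]
      · have hm0 : m = 0 := by omega
        rw [termsOfAP_go, if_neg (by rw [hlen']; omega)]
        subst hm0
        rw [pvTail_succ]
        simp [pvTail, pvTerm]
    · have h1 : (k + 1) % 3 = 2 := by omega
      have h2 : (k + 1) / 3 = k / 3 := by omega
      have hstep : pvN k + 1 = pvN (k + 1) := by
        simp only [pvN, h, h1, h2, pvOff1, pvOff2]
        ring
      rw [hstep, ih (k + 1) _ hlen' (by omega)]
      rw [pvTail_succ]
      simp [pvTerm]
    · have hstep : pvN k + 1 = pvN (k + 1) := by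
        simp only [pvN, pvOff, h]
        have h1 : (k + 1) % 3 = 0 := by omega
        have h2 : (k + 1) / 3 = k / 3 + 1 := by omega
        simp [h1, h2]
        ring
      rw [hstep, ih (k + 1) _ hlen' (by omega)]
      rw [pvTail_succ]
      simp [pvTerm]

lemma alt_eq (x : Int) : termsOfAP_alt x = pvTail 0 x.toNat := by
  unfold termsOfAP_alt pvTail
  rw [PySem.List.pyRange_one]
  simp only [Int.sub_zero, List.map_map]
  apply List.map_congr_left
  intro k _
  simp only [Function.comp, zero_add]
  have hd : PySem.Int.floordiv (k : Int) 3 = ((k / 3 : Nat) : Int) := by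
    exact_mod_cast PySem.Int.floordiv_natCast k 3
  have hm : PySem.Int.mod (k : Int) 3 = ((k % 3 : Nat) : Int) := by
    exact_mod_cast PySem.Int.mod_natCast k 3
  rw [hd, hm]
  have h3 : k % 3 = 0 ∨ k % 3 = 1 ∨ k % 3 = 2 := by omega
  rcases h3 with h | h | h <;>
    simp [h, pvTerm, pvN, pvOff, PySem.List.pyGet?, PySem.List.pyIdx?]

-- ===== VERDICT (by name: the statement is the Claim_ definition above) =====
theorem termsOfAP_spec : Claim_equal_termsOfAP := by
  intro x _
  unfold Spec_termsOfAP termsOfAP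
  have h1 : pvN 0 = 1 := by simp [pvN, pvOff0]
  rw [alt_eq, ← h1, go_eq x x.toNat 0 [] rfl (by omega)]
  simp
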